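-- pv_equiv track=rewrite | github.com/pmahajan3105/bt_agent | scripts/insight_opp_stage_pipeline_lib.py | _has_recent_signal
-- ===== SOURCE A (Python) =====
-- from typing import Any, Dict, Iterable, List, Optional, Tuple
--
-- def _contains_any(text: str, phrases: Iterable[str]) -> bool:
--     t = text.lower()
--     return any(p.lower() in t for p in phrases)
--
-- def _has_recent_signal(opps: List[Dict[str, Any]]) -> bool:
--     recent_phrases = [
--         "today",
--         "yesterday",
--         "spoke",
--         "spoke yesterday",
--         "met",
--         "meeting",
--         "call",
--         "emailed",
--         "replied",
--         "followed up",
--     ]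
--     for opp in opps:
--         s = f"{opp.get('summary', '')}\n{opp.get('notes', '')}".lower()
--         if _contains_any(s, recent_phrases):
--             return True
--     return False
-- ===== SOURCE B (Python) =====
-- from typing import Any, Dict, List
--
--
-- def _has_recent_signal(opps: List[Dict[str, Any]]) -> bool:
--     recent_phrases = [
--         "today",
--         "yesterday",
--         "spoke",
--         "spoke yesterday",
--         "met",
--         "meeting",
--         "call",
--         "emailed",
--         "replied",
--         "followed up",
--     ]
--     corpus = "\n".join(
--         f"{opp.get('summary', '')}\n{opp.get('notes', '')}" for opp in opps
--     ).lower()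
--     return any(p.lower() in corpus for p in recent_phrases)
-- ===== Notes on version B (the rewrite author's own statement) =====
-- stated objective: simpler
-- what changed: B replaces A's per-opportunity loop with an inner phrase scan and early return by a build-then-scan decomposition: it joins every opportunity's summary/notes into one lowercased corpus with '\n' separators (no phrase contains a newline, so no cross-boundary match) and does a single any() over the phrase list.
import Mathlib
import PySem

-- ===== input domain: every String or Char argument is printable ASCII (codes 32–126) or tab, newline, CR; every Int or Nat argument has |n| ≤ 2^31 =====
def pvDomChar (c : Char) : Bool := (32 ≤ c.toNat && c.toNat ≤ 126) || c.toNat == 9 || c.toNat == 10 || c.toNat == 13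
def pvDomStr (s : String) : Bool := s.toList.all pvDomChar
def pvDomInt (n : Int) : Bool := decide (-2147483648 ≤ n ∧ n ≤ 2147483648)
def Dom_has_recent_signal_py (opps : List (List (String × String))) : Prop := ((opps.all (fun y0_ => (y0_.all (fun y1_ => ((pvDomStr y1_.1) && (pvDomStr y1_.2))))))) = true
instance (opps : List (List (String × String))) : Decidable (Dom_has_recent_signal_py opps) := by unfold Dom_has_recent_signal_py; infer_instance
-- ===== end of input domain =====

-- B replaces A's per-opportunity loop (inner phrase scan, early return) by one lowercased
-- '\n'-joined corpus scanned once per phrase; structurally different, not claimed faster.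

-- ===== PORT A =====
-- the literal recent_phrases list (shared by both ports: both Pythons carry the same literal)
def pvRecentPhrases : List String :=
  ["today", "yesterday", "spoke", "spoke yesterday", "met", "meeting", "call",
   "emailed", "replied", "followed up"]

-- f"{opp.get('summary','')}\n{opp.get('notes','')}" as a char list (shared helper: both
-- Pythons build this very f-string)
def pvOppText (opp : List (String × String)) : List Char :=
  (PySem.Dict.getD ⟨opp⟩ "summary" "").toList ++ '\n' :: (PySem.Dict.getD ⟨opp⟩ "notes" "").toList

-- _contains_any(text, phrases): t = text.lower(); any(p.lower() in t for p in phrases)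
def pvContainsAny (text : List Char) (phrases : List String) : Bool :=
  let t := PySem.Chars.lower text
  phrases.any (fun p => PySem.Chars.isIn (PySem.Chars.lower p.toList) t)

def has_recent_signal_py (opps : List (List (String × String))) : Bool :=
  match opps with
  | [] => false
  | opp :: rest =>
      let s := PySem.Chars.lower (pvOppText opp)
      if pvContainsAny s pvRecentPhrases then true
      else has_recent_signal_py rest

-- ===== PORT B =====
-- corpus = "\n".join(f"…" for opp in opps).lower(); any(p.lower() in corpus for p in phrases)
def has_recent_signal_py_alt (opps : List (List (String × String))) : Bool :=
  let corpus := PySem.Chars.lower (PySem.Chars.join ['\n'] (opps.map pvOppText))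
  pvRecentPhrases.any (fun p => PySem.Chars.isIn (PySem.Chars.lower p.toList) corpus)

-- ===== PRECONDITION & SPEC =====
def Spec_has_recent_signal_py (opps : List (List (String × String))) (out : Bool) : Prop := out = has_recent_signal_py_alt opps
instance (opps : List (List (String × String))) (out : Bool) : Decidable (Spec_has_recent_signal_py opps out) := by unfold Spec_has_recent_signal_py; infer_instance

-- ===== CLAIM (what is proved, stated in full; the proofs are below) =====
def Claim_equal_has_recent_signal_py : Prop := ∀ (opps : List (List (String × String))), Dom_has_recent_signal_py opps → Spec_has_recent_signal_py opps (has_recent_signal_py opps)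

-- ===== LEMMAS AND PROOFS =====

theorem pv_toNat_ofNat (n : Nat) (h : n < 0xD800) : (Char.ofNat n).toNat = n := by
  unfold Char.ofNat
  rw [dif_pos (by exact Or.inl h : Nat.isValidChar n)]
  rfl

theorem pv_lowerChar_idem (c : Char) :
    PySem.Chars.lowerChar (PySem.Chars.lowerChar c) = PySem.Chars.lowerChar c := by
  by_cases h : PySem.Chars.isupper c = true
  · have hb : 65 ≤ c.toNat ∧ c.toNat ≤ 90 := by
      simpa only [PySem.Chars.isupper, Bool.and_eq_true, decide_eq_true_eq, Char.le_def,
        UInt32.le_iff_toNat_le, Char.toNat] using h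
    have hv : (Char.ofNat (c.toNat + 32)).toNat = c.toNat + 32 := pv_toNat_ofNat _ (by omega)
    have hfalse : PySem.Chars.isupper (Char.ofNat (c.toNat + 32)) = false := by
      simp only [PySem.Chars.isupper, Bool.and_eq_false_iff, decide_eq_false_iff_not, Char.le_def,
        UInt32.le_iff_toNat_le]
      right
      show ¬ ((Char.ofNat (c.toNat + 32)).val.toNat ≤ 'Z'.val.toNat)
      have h2 : (Char.ofNat (c.toNat + 32)).val.toNat = c.toNat + 32 := hv
      have h3 : ('Z'.val.toNat) = 90 := rfl
      rw [h2, h3]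
      omega
    simp [PySem.Chars.lowerChar, h, hfalse]
  · simp [PySem.Chars.lowerChar, h]

theorem pv_lower_idem (s : List Char) :
    PySem.Chars.lower (PySem.Chars.lower s) = PySem.Chars.lower s := by
  simp [PySem.Chars.lower, pv_lowerChar_idem]

theorem pv_any_congr_mem {α : Type} (l : List α) (f g : α → Bool)
    (h : ∀ a ∈ l, f a = g a) : l.any f = l.any g := by
  induction l with
  | nil => rfl
  | cons x t ih =>
      simp only [List.any_cons, h x (by simp), ih (fun a ha => h a (by simp [ha]))]

theorem pv_any_swap {α β : Type} (xs : List α) (ys : List β) (f : α → β → Bool) :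
    (xs.any fun x => ys.any fun y => f x y) = (ys.any fun y => xs.any fun x => f x y) := by
  rw [Bool.eq_iff_iff]
  simp only [List.any_eq_true]
  constructor <;> rintro ⟨u, hu, v, hv, hf⟩ <;> exact ⟨v, hv, u, hu, hf⟩

theorem pv_prefix_split {sub a b : List Char} {c : Char}
    (hp : sub <+: a ++ c :: b) (hc : c ∉ sub) : sub <+: a := by
  by_cases hlen : sub.length ≤ a.length
  · have htake := List.prefix_iff_eq_take.1 hp
    rw [List.take_append_of_le_length hlen] at htake
    exact List.prefix_iff_eq_take.2 (by simpa using htake.trans (by simp))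
  · exfalso
    apply hc
    have h1 : sub[a.length]'(by omega) = (a ++ c :: b)[a.length]'(by simp) :=
      hp.getElem (by omega)
    rw [List.getElem_append_right (by omega)] at h1
    simp only [Nat.sub_self, List.getElem_cons_zero] at h1
    rw [← h1]; exact List.getElem_mem _

theorem pv_isIn_split (sub a b : List Char) (c : Char) (hc : c ∉ sub) :
    PySem.Chars.isIn sub (a ++ c :: b) = (PySem.Chars.isIn sub a || PySem.Chars.isIn sub b) := by
  rcases h : PySem.Chars.isIn sub (a ++ c :: b) with _ | _
  · symm
    rw [Bool.or_eq_false_iff]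
    rw [PySem.Chars.isIn_eq_false_iff] at h
    rw [PySem.Chars.isIn_eq_false_iff, PySem.Chars.isIn_eq_false_iff]
    constructor
    · exact fun hinf => h (hinf.trans ⟨[], c :: b, by simp⟩)
    · exact fun hinf => h (hinf.trans ⟨a ++ [c], [], by simp⟩)
  · symm
    rw [← PySem.Chars.exists_prefix_drop_iff_isIn] at h
    obtain ⟨j, hj⟩ := h
    rw [Bool.or_eq_true_iff]
    by_cases hja : j ≤ a.length
    · left
      rw [List.drop_append_of_le_length hja] at hj
      rw [← PySem.Chars.exists_prefix_drop_iff_isIn]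
      exact ⟨j, pv_prefix_split hj hc⟩
    · right
      rw [← PySem.Chars.exists_prefix_drop_iff_isIn]
      refine ⟨j - a.length - 1, ?_⟩
      rw [List.drop_append, List.drop_eq_nil_of_le (by omega)] at hj
      simp only [List.nil_append] at hj
      have hdrop : List.drop (j - a.length) (c :: b) = List.drop (j - a.length - 1) b := by
        rw [show j - a.length = (j - a.length - 1) + 1 by omega]
        simp
      rwa [hdrop] at hj

theorem pv_isIn_nil_of_ne (sub : List Char) (h : sub ≠ []) :
    PySem.Chars.isIn sub [] = false := by
  rw [PySem.Chars.isIn_eq_false_iff]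
  exact fun hinf => h (List.eq_nil_of_infix_nil hinf)

theorem pv_isIn_join (sub : List Char) (c : Char) (hne : sub ≠ []) (hc : c ∉ sub) :
    ∀ pieces : List (List Char),
      PySem.Chars.isIn sub (PySem.Chars.join [c] pieces)
        = pieces.any (fun p => PySem.Chars.isIn sub p)
  | [] => by rw [PySem.Chars.join_nil, pv_isIn_nil_of_ne sub hne]; rfl
  | [p] => by rw [PySem.Chars.join_singleton]; simp
  | p :: q :: rest => by
      rw [PySem.Chars.join_cons_cons]
      have hshape : p ++ [c] ++ PySem.Chars.join [c] (q :: rest)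
          = p ++ c :: PySem.Chars.join [c] (q :: rest) := by simp
      rw [hshape, pv_isIn_split sub p _ c hc, pv_isIn_join sub c hne hc (q :: rest)]
      simp

theorem pv_lower_join (c : Char) (hc : PySem.Chars.lowerChar c = c) :
    ∀ l : List (List Char),
      PySem.Chars.lower (PySem.Chars.join [c] l) = PySem.Chars.join [c] (l.map PySem.Chars.lower)
  | [] => by rw [PySem.Chars.join_nil]; rfl
  | [p] => by rw [List.map_singleton, PySem.Chars.join_singleton, PySem.Chars.join_singleton]
  | p :: q :: rest => by
      rw [List.map_cons, List.map_cons, PySem.Chars.join_cons_cons, PySem.Chars.join_cons_cons]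
      have hrec := pv_lower_join c hc (q :: rest)
      simp only [PySem.Chars.lower, List.map_append, List.map_cons, List.map_nil, hc] at hrec ⊢
      rw [hrec]

theorem pv_A_eq_any (opps : List (List (String × String))) :
    has_recent_signal_py opps
      = opps.any (fun o => pvContainsAny (PySem.Chars.lower (pvOppText o)) pvRecentPhrases) := by
  induction opps with
  | nil => rfl
  | cons o rest ih =>
      rw [has_recent_signal_py, List.any_cons, ← ih]
      by_cases h : pvContainsAny (PySem.Chars.lower (pvOppText o)) pvRecentPhrases <;> simp [h]

theorem pv_phrase_side : ∀ p ∈ pvRecentPhrases,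
    PySem.Chars.lower p.toList ≠ [] ∧ '\n' ∉ PySem.Chars.lower p.toList := by decide

-- ===== VERDICT (by name: the statement is the Claim_ definition above) =====
theorem has_recent_signal_py_spec : Claim_equal_has_recent_signal_py := by
  intro opps _
  unfold Spec_has_recent_signal_py has_recent_signal_py_alt
  rw [pv_A_eq_any, pv_lower_join '\n' (by decide) (opps.map pvOppText)]
  rw [pv_any_congr_mem pvRecentPhrases _
        (fun p => (List.map PySem.Chars.lower (List.map pvOppText opps)).any
          (fun t => PySem.Chars.isIn (PySem.Chars.lower p.toList) t))
        (fun p hp => pv_isIn_join _ '\n' (pv_phrase_side p hp).1 (pv_phrase_side p hp).2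
          (List.map PySem.Chars.lower (List.map pvOppText opps)))]
  rw [pv_any_swap]
  simp only [List.any_map]
  apply pv_any_congr_mem
  intro o _
  simp only [pvContainsAny, Function.comp, pv_lower_idem]
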